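-- pv_equiv track=rewrite | github.com/ZqtCtios/RecommenderSystem | cate_combine.py | getHostname
-- ===== SOURCE A (Python) =====
-- def getHostname(hostname):
--     a=[]
--     for i in range(len(hostname)):
--         if hostname[i]=='.':
--             a.append(i)
--     if len(a)==0:
--         return hostname
--     if len(a)==1:
--         return hostname[:a[0]]
--     if hostname[a[0]+1:a[1]]=='com':
--         return hostname[0:a[0]]
--     return hostname[a[0]+1:a[1]]
-- ===== SOURCE B (Python) =====
-- def getHostname(hostname):
--     parts = hostname.split('.')
--     if len(parts) == 1:
--         return hostname
--     if len(parts) == 2: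
--         return parts[0]
--     if parts[1] == 'com':
--         return parts[0]
--     return parts[1]
-- ===== Notes on version B (the rewrite author's own statement) =====
-- stated objective: idiomatic
-- what changed: Replaced the loop that collects all dot indices and the manual index-arithmetic slicing with the standard str.split on the dot separator and direct selection of the first or second segment.
import Mathlib
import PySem

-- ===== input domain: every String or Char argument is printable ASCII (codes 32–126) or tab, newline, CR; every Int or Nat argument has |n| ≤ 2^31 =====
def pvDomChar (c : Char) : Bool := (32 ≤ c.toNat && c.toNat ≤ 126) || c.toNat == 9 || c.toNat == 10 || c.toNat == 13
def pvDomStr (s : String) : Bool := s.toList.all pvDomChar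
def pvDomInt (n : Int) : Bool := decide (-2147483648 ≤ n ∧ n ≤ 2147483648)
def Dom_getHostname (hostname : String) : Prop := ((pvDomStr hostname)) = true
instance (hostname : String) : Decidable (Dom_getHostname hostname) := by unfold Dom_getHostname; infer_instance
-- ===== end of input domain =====

-- B replaces A's dot-index-collecting loop and manual slicing by split('.') and direct segment selection (idiomatic; same behaviour).


-- ===== PORT A =====
def getHostname (hostname : String) : String :=
  let s := hostname.toList
  let a : List Int := (PySem.List.pyRange 0 s.length 1).foldl
      (fun acc i => if PySem.List.pyGet? s i = some '.' then acc ++ [i] else acc) []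
  if a.length = 0 then hostname
  else if a.length = 1 then
    String.ofList (PySem.List.slice s none (some (PySem.List.pyGetD a 0 0)))
  else if PySem.List.slice s (some (PySem.List.pyGetD a 0 0 + 1)) (some (PySem.List.pyGetD a 1 0))
          = "com".toList then
    String.ofList (PySem.List.slice s (some 0) (some (PySem.List.pyGetD a 0 0)))
  else
    String.ofList (PySem.List.slice s (some (PySem.List.pyGetD a 0 0 + 1)) (some (PySem.List.pyGetD a 1 0)))

-- ===== PORT B =====
def getHostname_alt (hostname : String) : String :=
  let parts := PySem.Chars.splitOn hostname.toList ".".toList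
  if parts.length = 1 then hostname
  else if parts.length = 2 then String.ofList (PySem.List.pyGetD parts 0 [])
  else if PySem.List.pyGetD parts 1 [] = "com".toList then
    String.ofList (PySem.List.pyGetD parts 0 [])
  else
    String.ofList (PySem.List.pyGetD parts 1 [])

-- ===== PRECONDITION & SPEC =====
def Spec_getHostname (hostname : String) (out : String) : Prop := out = getHostname_alt hostname
instance (hostname : String) (out : String) : Decidable (Spec_getHostname hostname out) := by unfold Spec_getHostname; infer_instance

-- ===== CLAIM (what is proved, stated in full; the proofs are below) =====
def Claim_equal_getHostname : Prop := ∀ (hostname : String), Dom_getHostname hostname → Spec_getHostname hostname (getHostname hostname)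

-- ===== LEMMAS AND PROOFS =====

-- the list of positions of '.' in s (A's list `a`, at the Nat level)
def dotList : List Char → List Nat
  | [] => []
  | c :: t => if c = '.' then 0 :: (dotList t).map (· + 1) else (dotList t).map (· + 1)

-- reference splitter: splitD pre s = the pieces of (pre ++ s) cut at the dots of s
def splitD : List Char → List Char → List (List Char)
  | pre, [] => [pre]
  | pre, c :: t => if c = '.' then pre :: splitD [] t else splitD (pre ++ [c]) t

theorem splitD_ne_nil (pre s) : splitD pre s ≠ [] := by
  induction s generalizing pre with
  | nil => simp [splitD]
  | cons c t ih => by_cases h : c = '.' <;> simp [splitD, h, ih]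

theorem splitOn_go_eq (l : List Char) : ∀ (fuel : Nat), l.length ≤ fuel →
    ∀ (cur : List Char) (acc : List (List Char)),
    PySem.Chars.splitOn.go ['.'] fuel l cur acc = acc.reverse ++ splitD cur.reverse l := by
  induction l with
  | nil =>
    intro fuel _ cur acc
    cases fuel <;> simp [PySem.Chars.splitOn.go, splitD]
  | cons c t ih =>
    intro fuel hf cur acc
    cases fuel with
    | zero => simp at hf
    | succ fuel =>
      by_cases h : c = '.'
      · subst h
        simp only [PySem.Chars.splitOn.go, List.isPrefixOf,
          Bool.and_true, beq_self_eq_true, if_pos]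
        rw [show List.drop (['.'] : List Char).length ('.' :: t) = t by simp]
        rw [ih fuel (by simpa using hf) [] (cur.reverse :: acc)]
        simp [splitD]
      · simp only [PySem.Chars.splitOn.go]
        rw [show (['.'].isPrefixOf (c :: t)) = false by
          simp [List.isPrefixOf]; exact fun hc => (h hc.symm).elim]
        simp only [Bool.false_eq_true, if_false]
        rw [ih fuel (by simpa using Nat.le_of_succ_le_succ hf) (c :: cur) acc]
        simp [splitD, h]

theorem splitOn_eq_splitD (s : List Char) :
    PySem.Chars.splitOn s ['.'] = splitD [] s := by
  have := splitOn_go_eq s (s.length + 1) (by omega) [] []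
  simpa [PySem.Chars.splitOn] using this

theorem splitD_no_dot (pre s) (h : '.' ∉ s) : splitD pre s = [pre ++ s] := by
  induction s generalizing pre with
  | nil => simp [splitD]
  | cons c t ih =>
    simp only [List.mem_cons, not_or] at h
    simp only [splitD]
    rw [if_neg (fun hc => h.1 hc.symm), ih _ h.2]
    simp

theorem splitD_dot (pre s) (h : '.' ∈ s) :
    splitD pre s = (pre ++ s.takeWhile (· ≠ '.')) ::
      splitD [] (s.drop ((s.takeWhile (· ≠ '.')).length + 1)) := by
  induction s generalizing pre with
  | nil => simp at h
  | cons c t ih =>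
    by_cases hc : c = '.'
    · subst hc; simp [splitD, List.takeWhile]
    · have ht : '.' ∈ t := by
        rcases List.mem_cons.mp h with h1 | h1
        · exact absurd h1.symm hc
        · exact h1
      simp only [splitD, if_neg hc]
      rw [ih _ ht]
      simp [List.takeWhile, hc, List.append_assoc]

theorem dotList_no_dot (s) (h : '.' ∉ s) : dotList s = [] := by
  induction s with
  | nil => simp [dotList]
  | cons c t ih =>
    simp only [List.mem_cons, not_or] at h
    simp [dotList, Ne.symm h.1, ih h.2]

theorem dotList_dot (s) (h : '.' ∈ s) :
    dotList s = (s.takeWhile (· ≠ '.')).length ::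
      (dotList (s.drop ((s.takeWhile (· ≠ '.')).length + 1))).map
        (· + ((s.takeWhile (· ≠ '.')).length + 1)) := by
  induction s with
  | nil => simp at h
  | cons c t ih =>
    by_cases hc : c = '.'
    · subst hc; simp [dotList, List.takeWhile]
    · have ht : '.' ∈ t := by
        rcases List.mem_cons.mp h with h1 | h1
        · exact absurd h1.symm hc
        · exact h1
      simp only [dotList, if_neg hc]
      rw [ih ht]
      simp only [List.takeWhile]
      rw [show (decide (c ≠ '.')) = true by simp [hc]]
      simp [List.map_map, Function.comp_def]
      intro x _; omega

theorem pyRange_zero_len (n : Nat) :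
    PySem.List.pyRange 0 (n : Int) 1 = (List.range n).map (Nat.cast : Nat → Int) := by
  rcases Nat.eq_zero_or_pos n with h | h
  · subst h; simp [PySem.List.pyRange]
  · have h' : (0 : Int) < (n : Int) := by exact_mod_cast h
    simp only [PySem.List.pyRange, if_neg (by norm_num : ¬ (1:Int) = 0), if_pos (by norm_num : (0:Int) < 1),
      if_pos h']
    have hc : (((n : Int) - 0 + 1 - 1) / 1).toNat = n := by
      norm_num
    rw [hc]
    apply List.map_congr_left; intro k _; simp

theorem foldl_dots (s : List Char) (l : List Int) (acc : List Int) :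
    l.foldl (fun acc i => if PySem.List.pyGet? s i = some '.' then acc ++ [i] else acc) acc
    = acc ++ l.filter (fun i => decide (PySem.List.pyGet? s i = some '.')) := by
  induction l generalizing acc with
  | nil => simp
  | cons x l ih =>
    by_cases h : PySem.List.pyGet? s x = some '.'
    · simp [List.foldl_cons, h, ih]
    · simp [List.foldl_cons, h, ih]

theorem range_filter_eq_dotList (s : List Char) :
    (List.range s.length).filter (fun i => decide (s[i]? = some '.')) = dotList s := by
  induction s with
  | nil => simp [dotList]
  | cons c t ih =>
    rw [List.length_cons, List.range_succ_eq_map, List.filter_cons]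
    rw [List.filter_map]
    have hcomp : (List.filter ((fun i => decide ((c :: t)[i]? = some '.')) ∘ Nat.succ) (List.range t.length))
        = List.filter (fun i => decide (t[i]? = some '.')) (List.range t.length) := by
      apply List.filter_congr; intro x _; simp
    rw [hcomp, ih]
    by_cases hc : c = '.'
    · subst hc; simp [dotList]
    · simp [dotList, hc]

-- A's index list equals dotList (cast to Int)
theorem fold_eq_dotList (s : List Char) :
    (PySem.List.pyRange 0 s.length 1).foldl
      (fun acc i => if PySem.List.pyGet? s i = some '.' then acc ++ [i] else acc) []
    = (dotList s).map (Nat.cast : Nat → Int) := by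
  rw [pyRange_zero_len, foldl_dots, List.nil_append, List.filter_map]
  have hcomp : (List.filter ((fun i => decide (PySem.List.pyGet? s i = some '.')) ∘ (Nat.cast : Nat → Int))
      (List.range s.length)) = List.filter (fun i => decide (s[i]? = some '.')) (List.range s.length) := by
    apply List.filter_congr; intro x _; simp [PySem.List.pyGet?_natCast]
  rw [hcomp, range_filter_eq_dotList]

theorem pyGetD_zero {α : Type} (x : α) (l : List α) (d : α) :
    PySem.List.pyGetD (x :: l) 0 d = x := by
  simp [PySem.List.pyGetD, PySem.List.pyGet?, PySem.List.pyIdx?]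

theorem pyGetD_one {α : Type} (x y : α) (l : List α) (d : α) :
    PySem.List.pyGetD (x :: y :: l) 1 d = y := by
  simp [PySem.List.pyGetD, PySem.List.pyGet?, PySem.List.pyIdx?]

theorem take_takeWhile (s : List Char) (p : Char → Bool) :
    s.take (s.takeWhile p).length = s.takeWhile p :=
  ((List.prefix_iff_eq_take).mp (List.takeWhile_prefix p)).symm

theorem dot_toList : (".".toList : List Char) = ['.'] := by decide

theorem main_eq (hostname : String) : getHostname hostname = getHostname_alt hostname := by
  simp only [getHostname, getHostname_alt]
  rw [dot_toList, splitOn_eq_splitD, fold_eq_dotList]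
  set s := hostname.toList with hs
  by_cases hd : '.' ∈ s
  · rw [dotList_dot s hd, splitD_dot [] s hd, List.nil_append]
    set p := s.takeWhile (· ≠ '.') with hp
    set r := s.drop (p.length + 1) with hr
    by_cases hrd : '.' ∈ r
    · -- at least two dots
      rw [dotList_dot r hrd, splitD_dot [] r hrd, List.nil_append]
      set q := r.takeWhile (· ≠ '.') with hq
      set r' := r.drop (q.length + 1) with hr'
      have hne : splitD [] r' ≠ [] := splitD_ne_nil [] r'
      have hpos : 0 < (splitD [] r').length := List.length_pos_of_ne_nil hne
      simp only [List.map_cons, List.length_cons, List.length_map]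
      rw [pyGetD_zero, pyGetD_one, pyGetD_zero, pyGetD_one]
      have hslice : PySem.List.slice s (some ((p.length : Int) + 1))
          (some (((q.length + (p.length + 1) : Nat)) : Int)) = q := by
        have h1 : ((p.length : Int) + 1) = ((p.length + 1 : Nat) : Int) := by push_cast; ring
        have h2 : (((q.length + (p.length + 1) : Nat)) : Int)
            = ((((p.length + 1) + q.length : Nat)) : Int) := by push_cast; ring
        rw [h1, h2, PySem.List.slice_natCast]
        rw [show (p.length + 1 + q.length) - (p.length + 1) = q.length by omega]
        rw [← hr, hq, take_takeWhile]
      have hslice0 : PySem.List.slice s (some 0) (some ((p.length : Nat) : Int)) = p := by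
        rw [PySem.List.slice_zero_start, PySem.List.slice_to_natCast, hp, take_takeWhile]
      rw [if_neg (by omega), if_neg (by omega), hslice, hslice0]
      by_cases hcom : q = "com".toList
      · rw [if_pos hcom, if_neg (by omega), if_neg (by omega)]
      · rw [if_neg hcom, if_neg (by omega), if_neg (by omega)]
    · -- exactly one dot
      rw [dotList_no_dot r hrd, splitD_no_dot [] r hrd, List.nil_append]
      simp only [List.map_nil, List.map_cons, List.length_cons, List.length_nil]
      norm_num
      rw [hp, take_takeWhile]
  · rw [dotList_no_dot s hd, splitD_no_dot [] s hd, List.nil_append]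
    simp

-- ===== VERDICT (by name: the statement is the Claim_ definition above) =====
theorem getHostname_spec : Claim_equal_getHostname := by
  intro hostname _
  unfold Spec_getHostname
  exact main_eq hostname
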